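-- pv_equiv track=rewrite | github.com/Bigouz/SingOnLight | score.py | calculer
-- ===== SOURCE A (Python) =====
-- def calculer(reference:list[int], essai:list[int], score:int=0)->int:
--     """IN: 2 listes de 0 ou 1 (0 = silence, 1 = bruit)
--        OUT: un score
--     """
--     assert len(reference) <= len(essai)
--     if len(reference) == len(essai) == 0:
--         return score
--     if reference[0] == 1:
--         if essai[0] == 1:
--             score += 10
--             return calculer(reference[1:], essai[1:], score)
--         if len(essai) > 1:
--             if essai[1] == 1:
--                 score += 5
--                 essai = [0] + essai[2:]
--                 if reference[1] == 1:
--                     essai[0] = 1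
--                 return calculer(reference[1:], essai, score)
--     if reference[0] == 0:
--         if essai[0] == 1:
--             score -= 10
--             return calculer(reference[1:], essai[1:], score)
--     return calculer(reference[1:], essai[1:], score)
-- ===== SOURCE B (Python) =====
-- def calculer(reference: list[int], essai: list[int], score: int = 0) -> int:
--     """IN: 2 listes de 0 ou 1 (0 = silence, 1 = bruit)
--        OUT: un score
--     """
--     assert len(reference) <= len(essai)
--     n = len(reference)
--     s = score
--     override = None
--     for i in range(n):
--         r = reference[i]
--         e = override if override is not None else essai[i]
--         override = None
--         if r == 1:
--             if e == 1:
--                 s += 10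
--             elif i + 1 < n and essai[i + 1] == 1:
--                 s += 5
--                 override = 1 if reference[i + 1] == 1 else 0
--         elif r == 0 and e == 1:
--             s -= 10
--     return s
-- ===== Notes on version B (the rewrite author's own statement) =====
-- stated objective: faster
-- what changed: Replaced A's recursion with list slicing (each step copies reference[1:]/essai[1:], O(n^2)) by a single O(n) for-loop over indices carrying an override flag that stands for A's patched essai head.
import Mathlib
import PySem

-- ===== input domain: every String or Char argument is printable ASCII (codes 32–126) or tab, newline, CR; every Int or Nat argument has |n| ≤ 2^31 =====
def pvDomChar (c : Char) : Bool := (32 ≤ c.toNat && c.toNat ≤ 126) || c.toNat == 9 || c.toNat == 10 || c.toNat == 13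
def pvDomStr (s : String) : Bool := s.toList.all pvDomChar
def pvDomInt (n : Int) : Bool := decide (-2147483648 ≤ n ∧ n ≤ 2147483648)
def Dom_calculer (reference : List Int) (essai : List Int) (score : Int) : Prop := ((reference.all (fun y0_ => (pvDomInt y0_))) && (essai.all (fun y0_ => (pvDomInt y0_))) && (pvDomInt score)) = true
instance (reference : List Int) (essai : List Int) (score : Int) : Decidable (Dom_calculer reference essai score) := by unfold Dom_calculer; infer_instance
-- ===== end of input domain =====

-- B replaces A's O(n^2) list-slicing recursion by a single O(n) index loop carrying an override flag for the patched essai head.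

-- ===== PORT A =====
-- literal transliteration of A's recursion; where Python raises (IndexError/AssertionError,
-- i.e. unequal lengths, excluded by Pre_) the default-valued accesses are irrelevant
def calculer (reference : List Int) (essai : List Int) (score : Int) : Int :=
  match reference with
  | [] => score          -- Python returns score only when essai = [] too; otherwise it raises (outside Pre_)
  | r :: rtl =>
    let e0 := essai.getD 0 0      -- essai[0]
    if r = 1 then
      if e0 = 1 then calculer rtl essai.tail (score + 10)
      else if 1 < essai.length then
        if essai.getD 1 0 = 1 then
          calculer rtl ((if (r :: rtl).getD 1 0 = 1 then (1 : Int) else 0) :: essai.drop 2) (score + 5)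
        else calculer rtl essai.tail score
      else calculer rtl essai.tail score
    else if r = 0 then
      if e0 = 1 then calculer rtl essai.tail (score - 10)
      else calculer rtl essai.tail score
    else calculer rtl essai.tail score

-- ===== PORT B =====
-- literal transliteration of Source B: one for-loop over range(n) with state (override, s)
def calculer_alt (reference : List Int) (essai : List Int) (score : Int) : Int :=
  let n := reference.length
  ((List.range n).foldl (fun (st : Option Int × Int) i =>
      let r := reference.getD i 0
      let e := st.1.getD (essai.getD i 0)
      let s := st.2
      if r = 1 then
        if e = 1 then (none, s + 10)
        else if i + 1 < n ∧ essai.getD (i + 1) 0 = 1 then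
          (some (if reference.getD (i + 1) 0 = 1 then (1 : Int) else 0), s + 5)
        else (none, s)
      else if r = 0 ∧ e = 1 then (none, s - 10)
      else (none, s)) (none, score)).2

-- ===== PRECONDITION & SPEC =====
-- A returns normally exactly when the two lists have equal length: each recursive step
-- preserves the length difference, so a shorter reference ends in IndexError and a longer
-- one in AssertionError.
def Pre_calculer (reference : List Int) (essai : List Int) (score : Int) : Prop :=
  reference.length = essai.length
instance (reference : List Int) (essai : List Int) (score : Int) : Decidable (Pre_calculer reference essai score) := by unfold Pre_calculer; infer_instance
def pvWitness_calculer : List Int × List Int × Int := ([1, 0, 1], [0, 1, 1], 0)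

def Spec_calculer (reference : List Int) (essai : List Int) (score : Int) (out : Int) : Prop := out = calculer_alt reference essai score
instance (reference : List Int) (essai : List Int) (score : Int) (out : Int) : Decidable (Spec_calculer reference essai score out) := by unfold Spec_calculer; infer_instance

-- ===== CLAIM (what is proved, stated in full; the proofs are below) =====
def Claim_equal_calculer : Prop := ∀ (reference : List Int) (essai : List Int) (score : Int), Dom_calculer reference essai score → Pre_calculer reference essai score → Spec_calculer reference essai score (calculer reference essai score)
-- ===== LEMMAS AND PROOFS =====

-- B's fold with a generalized initial state (override, s)
def altGo (reference : List Int) (essai : List Int) (st0 : Option Int × Int) : Int :=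
  let n := reference.length
  ((List.range n).foldl (fun (st : Option Int × Int) i =>
      let r := reference.getD i 0
      let e := st.1.getD (essai.getD i 0)
      let s := st.2
      if r = 1 then
        if e = 1 then (none, s + 10)
        else if i + 1 < n ∧ essai.getD (i + 1) 0 = 1 then
          (some (if reference.getD (i + 1) 0 = 1 then (1 : Int) else 0), s + 5)
        else (none, s)
      else if r = 0 ∧ e = 1 then (none, s - 10)
      else (none, s)) st0).2

theorem calculer_alt_eq_altGo (reference essai : List Int) (score : Int) :
    calculer_alt reference essai score = altGo reference essai (none, score) := rfl

-- the first loop iteration, written exactly as it unfolds for (r :: rtl) / (e :: etl)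
def headStep (r : Int) (rtl : List Int) (e : Int) (etl : List Int) (st : Option Int × Int) :
    Option Int × Int :=
  let ee := st.1.getD e
  let s := st.2
  if r = 1 then
    if ee = 1 then (none, s + 10)
    else if 0 + 1 < rtl.length + 1 ∧ etl.getD 0 0 = 1 then
      (some (if rtl.getD 0 0 = 1 then (1 : Int) else 0), s + 5)
    else (none, s)
  else if r = 0 ∧ ee = 1 then (none, s - 10)
  else (none, s)

theorem altGo_cons (r : Int) (rtl : List Int) (e : Int) (etl : List Int) (st : Option Int × Int) :
    altGo (r :: rtl) (e :: etl) st = altGo rtl etl (headStep r rtl e etl st) := by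
  simp only [altGo, headStep, List.length_cons, List.range_succ_eq_map, List.foldl_cons,
    List.foldl_map, Nat.succ_eq_add_one, List.getD_cons_zero, List.getD_cons_succ,
    Nat.add_lt_add_iff_right]

-- apply the pending override to the head of essai (A carries the patched list, B the flag)
def applyOv : Option Int → List Int → List Int
  | none, es => es
  | some _, [] => []
  | some v, _ :: t => v :: t

theorem calculer_eq_altGo : ∀ (reference essai : List Int) (ov : Option Int) (s : Int),
    reference.length = essai.length →
    calculer reference (applyOv ov essai) s = altGo reference essai (ov, s) := by
  intro reference
  induction reference with
  | nil => intro essai ov s h; cases essai <;> simp_all [calculer, altGo]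
  | cons r rtl ih =>
    intro essai ov s h
    cases essai with
    | nil => simp at h
    | cons e etl =>
      have hlen : rtl.length = etl.length := by simpa using h
      rw [altGo_cons]
      have happ : applyOv ov (e :: etl) = (ov.getD e) :: etl := by
        cases ov <;> rfl
      rw [happ]
      show calculer (r :: rtl) ((ov.getD e) :: etl) s = _
      rw [calculer, headStep]
      simp only [List.getD_cons_zero, List.getD_cons_succ, List.tail_cons, List.length_cons,
        List.drop_succ_cons]
      split_ifs <;> try omega
      all_goals (try exact ih etl none _ hlen)
      all_goals
        cases etl with
        | nil => simp_all
        | cons a t =>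
          first
          | exact ih (a :: t) (some 1) _ hlen
          | exact ih (a :: t) (some 0) _ hlen

-- ===== VERDICT (by name: the statement is the Claim_ definition above) =====
theorem calculer_spec : Claim_equal_calculer := by
  intro reference essai score _ hpre
  unfold Spec_calculer
  rw [calculer_alt_eq_altGo, ← calculer_eq_altGo reference essai none score hpre]
  rfl
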